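-- pv_equiv track=rewrite | github.com/Ananyabhatt23/Sample-Python-Programs | sample2pgms.py | generate_grade_dictionary
-- ===== SOURCE A (Python) =====
-- def calculate_grade(mark):
--     if mark >= 90:
--         return 'A+'
--     elif mark >= 80:
--         return 'A'
--     elif mark >= 70:
--         return 'B'
--     elif mark >= 60:
--         return 'C'
--     else:
--         return " "
--
-- def generate_grade_dictionary(student_data):
--     grade_dict = {}
--     for student, marks in student_data.items():
--         subject_grades = {}
--         for subject, mark in marks.items():
--             subject_grades[subject] = calculate_grade(mark)
--         grade_dict[student] = subject_grades
--     return grade_dict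
-- ===== SOURCE B (Python) =====
-- _GRADES = (" ", "C", "B", "A", "A+")
--
-- def generate_grade_dictionary(student_data):
--     # stage 1: one grade table covering every distinct mark, band found by
--     # floor-division arithmetic (decade index clamped to 0..4), no comparison chain
--     memo = {m: _GRADES[min(max(m // 10 - 5, 0), 4)]
--             for marks in student_data.values() for m in marks.values()}
--     # stage 2: build the nested structure by pure table lookup
--     return {s: {sub: memo[m] for sub, m in marks.items()}
--             for s, marks in student_data.items()}
-- ===== Notes on version B (the rewrite author's own statement) =====
-- stated objective: alternative
-- what changed: B is two-staged: it first builds a memo dict mapping every distinct mark to its grade, computed by clamped floor-division arithmetic (m//10-5 clamped to 0..4 indexing a grade table) instead of the if-elif comparison chain, then builds the nested result by pure memo lookups.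
import Mathlib
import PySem

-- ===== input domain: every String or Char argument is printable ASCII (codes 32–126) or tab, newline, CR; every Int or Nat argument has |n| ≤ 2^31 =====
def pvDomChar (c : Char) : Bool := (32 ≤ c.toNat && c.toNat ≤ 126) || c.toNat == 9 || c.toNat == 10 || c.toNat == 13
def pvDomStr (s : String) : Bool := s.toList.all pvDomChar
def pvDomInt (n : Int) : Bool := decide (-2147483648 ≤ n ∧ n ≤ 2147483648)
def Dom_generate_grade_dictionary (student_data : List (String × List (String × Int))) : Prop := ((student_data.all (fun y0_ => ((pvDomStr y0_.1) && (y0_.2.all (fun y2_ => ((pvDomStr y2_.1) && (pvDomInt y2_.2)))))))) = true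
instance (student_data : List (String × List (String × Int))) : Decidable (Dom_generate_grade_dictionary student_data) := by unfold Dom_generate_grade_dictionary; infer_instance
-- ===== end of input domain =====

-- B is two-staged: a memo dict (distinct mark -> grade, grade via clamped floor-division
-- arithmetic into a table) built first, then the nested dicts filled by pure memo lookups
-- (alternative algorithm, same cost).


-- ===== PORT A =====
def calculate_grade (mark : Int) : String :=
  if mark ≥ 90 then "A+"
  else if mark ≥ 80 then "A"
  else if mark ≥ 70 then "B"
  else if mark ≥ 60 then "C"
  else " "

def generate_grade_dictionary (student_data : List (String × List (String × Int))) : List (String × List (String × String)) :=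
  (student_data.foldl
    (fun gd p =>
      gd.insert p.1
        ((p.2.foldl (fun sg q => sg.insert q.1 (calculate_grade q.2))
          (PySem.Dict.empty : PySem.Dict String String)).items))
    (PySem.Dict.empty : PySem.Dict String (List (String × String)))).items

-- ===== PORT B =====
-- _GRADES[min(max(m // 10 - 5, 0), 4)]: the index is always 0..4, so the pyGetD default is never consulted
def grade_band (m : Int) : String :=
  PySem.List.pyGetD [" ", "C", "B", "A", "A+"]
    (min (max (PySem.Int.floordiv m 10 - 5) 0) 4) " "

-- stage 1 of Source B: the memo dict comprehension over all marks
def build_memo (student_data : List (String × List (String × Int))) : PySem.Dict Int String :=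
  student_data.foldl
    (fun d p => p.2.foldl (fun d' q => d'.insert q.2 (grade_band q.2)) d)
    (PySem.Dict.empty : PySem.Dict Int String)

-- stage 2 of Source B; memo[m] always hits (memo was built from the same marks), ported as getD
def generate_grade_dictionary_alt (student_data : List (String × List (String × Int))) : List (String × List (String × String)) :=
  let memo := build_memo student_data
  (student_data.foldl
    (fun gd p =>
      gd.insert p.1
        ((p.2.foldl (fun sg q => sg.insert q.1 (memo.getD q.2 " "))
          (PySem.Dict.empty : PySem.Dict String String)).items))
    (PySem.Dict.empty : PySem.Dict String (List (String × String)))).items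

-- ===== PRECONDITION & SPEC =====
def Spec_generate_grade_dictionary (student_data : List (String × List (String × Int))) (out : List (String × List (String × String))) : Prop := out = generate_grade_dictionary_alt student_data
instance (student_data : List (String × List (String × Int))) (out : List (String × List (String × String))) : Decidable (Spec_generate_grade_dictionary student_data out) := by unfold Spec_generate_grade_dictionary; infer_instance

-- ===== CLAIM (what is proved, stated in full; the proofs are below) =====
def Claim_equal_generate_grade_dictionary : Prop := ∀ (student_data : List (String × List (String × Int))), Dom_generate_grade_dictionary student_data → Spec_generate_grade_dictionary student_data (generate_grade_dictionary student_data)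

-- ===== LEMMAS AND PROOFS =====

-- the arithmetic band equals the if-elif ladder
lemma grade_band_eq (m : Int) : grade_band m = calculate_grade m := by
  unfold grade_band calculate_grade
  rw [PySem.Int.floordiv_eq_ediv_of_pos (by norm_num : (0:Int) < 10)]
  by_cases h90 : m ≥ 90
  · have : min (max (m / 10 - 5) 0) 4 = 4 := by omega
    rw [this]; simp [h90] <;> decide
  · by_cases h80 : m ≥ 80
    · have : min (max (m / 10 - 5) 0) 4 = 3 := by omega
      rw [this]; simp [h90, h80] <;> decide
    · by_cases h70 : m ≥ 70
      · have : min (max (m / 10 - 5) 0) 4 = 2 := by omega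
        rw [this]; simp [h90, h80, h70] <;> decide
      · by_cases h60 : m ≥ 60
        · have : min (max (m / 10 - 5) 0) 4 = 1 := by omega
          rw [this]; simp [h90, h80, h70, h60] <;> decide
        · have : min (max (m / 10 - 5) 0) 4 = 0 := by omega
          rw [this]; simp [h90, h80, h70, h60]

-- once a key maps to its band, it keeps doing so through any memo insert
lemma memo_insert_pres (d : PySem.Dict Int String) (k k' : Int)
    (h : d.get? k = some (grade_band k)) :
    (d.insert k' (grade_band k')).get? k = some (grade_band k) := by
  rw [PySem.Dict.get?_insert]
  by_cases hk : k = k' <;> simp [hk, h]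

lemma memo_inner_pres (marks : List (String × Int)) (d : PySem.Dict Int String) (k : Int)
    (h : d.get? k = some (grade_band k)) :
    (marks.foldl (fun d' q => d'.insert q.2 (grade_band q.2)) d).get? k = some (grade_band k) := by
  induction marks generalizing d with
  | nil => exact h
  | cons q rest ih => exact ih _ (memo_insert_pres d k q.2 h)

lemma memo_inner_hit (marks : List (String × Int)) (d : PySem.Dict Int String)
    (q : String × Int) (hq : q ∈ marks) :
    (marks.foldl (fun d' r => d'.insert r.2 (grade_band r.2)) d).get? q.2 = some (grade_band q.2) := by
  induction marks generalizing d with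
  | nil => cases hq
  | cons r rest ih =>
      rcases List.mem_cons.mp hq with h | h
      · subst h
        exact memo_inner_pres rest _ q.2 (PySem.Dict.get?_insert_self _ _ _)
      · exact ih _ h

lemma memo_outer_pres (sd : List (String × List (String × Int))) (d : PySem.Dict Int String) (k : Int)
    (h : d.get? k = some (grade_band k)) :
    (sd.foldl (fun d' p => p.2.foldl (fun d'' q => d''.insert q.2 (grade_band q.2)) d') d).get? k
      = some (grade_band k) := by
  induction sd generalizing d with
  | nil => exact h
  | cons p rest ih => exact ih _ (memo_inner_pres p.2 d k h)

lemma memo_outer_hit (sd : List (String × List (String × Int))) (d : PySem.Dict Int String)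
    (p : String × List (String × Int)) (q : String × Int)
    (hp : p ∈ sd) (hq : q ∈ p.2) :
    (sd.foldl (fun d' r => r.2.foldl (fun d'' s => d''.insert s.2 (grade_band s.2)) d') d).get? q.2
      = some (grade_band q.2) := by
  induction sd generalizing d with
  | nil => cases hp
  | cons r rest ih =>
      rcases List.mem_cons.mp hp with h | h
      · subst h
        exact memo_outer_pres rest _ q.2 (memo_inner_hit p.2 _ q hq)
      · exact ih _ h

lemma memo_hit (sd : List (String × List (String × Int)))
    (p : String × List (String × Int)) (q : String × Int)
    (hp : p ∈ sd) (hq : q ∈ p.2) :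
    (build_memo sd).get? q.2 = some (grade_band q.2) :=
  memo_outer_hit sd _ p q hp hq

-- the memo lookup equals A's grade computation for every mark actually present
lemma memo_lookup (sd : List (String × List (String × Int)))
    (p : String × List (String × Int)) (q : String × Int)
    (hp : p ∈ sd) (hq : q ∈ p.2) :
    (build_memo sd).getD q.2 " " = calculate_grade q.2 := by
  rw [PySem.Dict.getD_eq_get?_getD, memo_hit sd p q hp hq]
  simp [grade_band_eq]

-- ===== VERDICT (by name: the statement is the Claim_ definition above) =====
theorem generate_grade_dictionary_spec : Claim_equal_generate_grade_dictionary := by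
  intro sd _
  unfold Spec_generate_grade_dictionary generate_grade_dictionary generate_grade_dictionary_alt
  congr 1
  apply PySem.List.foldl_congr_mem
  intro acc p hp
  congr 1
  congr 1
  apply PySem.List.foldl_congr_mem
  intro sg q hq
  rw [memo_lookup sd p q hp hq]
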